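-- pv_equiv track=rewrite | github.com/ntnkob/seqFIre2021 | app/download/seqFIRE.py | search_for_simple_indels
-- ===== SOURCE A (Python) =====
-- def search_for_simple_indels(pseudoalignments, inter_indels, indel_positions):
-- 	indels = ''
-- 	for i in range(0, len(indel_positions), 2):
-- 		simple = True
-- 		for pseudoalignment in pseudoalignments:
-- 			indel_body = pseudoalignment[1][indel_positions[i]:indel_positions[i+1]]
-- 			if not ('-'*len(indel_body) == indel_body or not '-' in indel_body):
-- 				simple = False
-- 		if simple: indels = indels + 's'
-- 		else: indels = indels + 'c'
-- 	return indels
-- ===== SOURCE B (Python) =====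
-- def _dash_table(seq):
--     pref = [0]
--     c = 0
--     for ch in seq:
--         if ch == '-':
--             c += 1
--         pref.append(c)
--     return (pref, len(seq))
--
-- def _clamp(i, n):
--     j = i + n if i < 0 else i
--     return 0 if j < 0 else (n if j > n else j)
--
-- def _simple_region(t, a, b):
--     pref, n = t
--     aa = _clamp(a, n)
--     bb = _clamp(b, n)
--     d = pref[bb] - pref[aa]
--     return not (0 < d < bb - aa)
--
-- def search_for_simple_indels(pseudoalignments, inter_indels, indel_positions):
--     if not indel_positions:
--         return ''
--     tables = [_dash_table(pa[1]) for pa in pseudoalignments]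
--     out = []
--     for i in range(0, len(indel_positions), 2):
--         simple = all(_simple_region(t, indel_positions[i], indel_positions[i + 1])
--                      for t in tables)
--         out.append('s' if simple else 'c')
--     return ''.join(out)
-- ===== Notes on version B (the rewrite author's own statement) =====
-- stated objective: alternative
-- what changed: B precomputes, once per alignment, a prefix array of dash counts (skipping the precomputation when there are no regions), so each region test becomes a constant-time arithmetic check on clamped indices instead of A's building the slice, comparing it with a replicated dash string and scanning it for a dash.
import Mathlib
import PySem

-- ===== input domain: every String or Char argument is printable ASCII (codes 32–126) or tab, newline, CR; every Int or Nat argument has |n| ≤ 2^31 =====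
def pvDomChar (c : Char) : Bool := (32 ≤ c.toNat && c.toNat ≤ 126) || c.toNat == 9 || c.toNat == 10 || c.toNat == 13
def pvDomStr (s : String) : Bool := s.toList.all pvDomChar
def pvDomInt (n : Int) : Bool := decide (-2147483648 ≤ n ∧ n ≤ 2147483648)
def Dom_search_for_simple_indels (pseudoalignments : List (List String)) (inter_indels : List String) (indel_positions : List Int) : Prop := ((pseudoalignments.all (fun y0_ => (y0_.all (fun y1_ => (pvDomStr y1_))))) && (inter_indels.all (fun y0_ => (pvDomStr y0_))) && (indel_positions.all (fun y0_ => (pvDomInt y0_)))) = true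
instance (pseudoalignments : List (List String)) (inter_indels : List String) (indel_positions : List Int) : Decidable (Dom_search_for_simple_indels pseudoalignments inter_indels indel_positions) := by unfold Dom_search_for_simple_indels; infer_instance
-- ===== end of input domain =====

-- B replaces A's per-region building-and-scanning of every alignment slice by per-alignment
-- prefix dash counts built once (skipped when there are no regions), answering each region by
-- a constant-time arithmetic check; objective: alternative. String concatenation / ''.join of
-- one-char pieces are ported at the code-point level (List Char via String.ofList), per PySem.

-- ===== PORT A =====
def search_for_simple_indels (pseudoalignments : List (List String)) (inter_indels : List String) (indel_positions : List Int) : String :=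
  String.ofList ((PySem.List.pyRange 0 (indel_positions.length : Int) 2).foldl (fun indels i =>
    let simple := pseudoalignments.foldl (fun simple pseudoalignment =>
      let indel_body := PySem.List.slice (PySem.List.pyGetD pseudoalignment 1 "").toList
          (some (PySem.List.pyGetD indel_positions i 0)) (some (PySem.List.pyGetD indel_positions (i + 1) 0))
      if ¬ (List.replicate indel_body.length '-' = indel_body ∨ PySem.Chars.isIn ['-'] indel_body = false)
        then false else simple) true
    if simple then indels ++ ['s'] else indels ++ ['c']) [])

-- ===== PORT B =====
-- loop body of _dash_table's prefix loop
def pvStep (st : List Int × Int) (ch : Char) : List Int × Int :=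
  let c := if ch = '-' then st.2 + 1 else st.2
  (st.1 ++ [c], c)

-- _dash_table(seq): prefix dash counts plus len(seq)
def pvDashTable (seq : List Char) : List Int × Int :=
  ((seq.foldl pvStep ([0], 0)).1, (seq.length : Int))

-- _clamp(i, n)
def pvClampB (i n : Int) : Int :=
  let j := if i < 0 then i + n else i
  if j < 0 then 0 else if j > n then n else j

-- _simple_region(t, a, b)
def pvSimpleRegion (t : List Int × Int) (a b : Int) : Bool :=
  let aa := pvClampB a t.2
  let bb := pvClampB b t.2
  let d := PySem.List.pyGetD t.1 bb 0 - PySem.List.pyGetD t.1 aa 0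
  !(decide (0 < d ∧ d < bb - aa))

def search_for_simple_indels_alt (pseudoalignments : List (List String)) (inter_indels : List String) (indel_positions : List Int) : String :=
  if indel_positions = [] then "" else
  let tables := pseudoalignments.map (fun pa => pvDashTable (PySem.List.pyGetD pa 1 "").toList)
  String.ofList ((PySem.List.pyRange 0 (indel_positions.length : Int) 2).foldl (fun out i =>
    let simple := tables.all (fun t =>
      pvSimpleRegion t (PySem.List.pyGetD indel_positions i 0) (PySem.List.pyGetD indel_positions (i + 1) 0))
    out ++ [if simple then 's' else 'c']) [])

-- ===== PRECONDITION & SPEC =====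
-- Pre_ admits exactly the inputs on which A returns; it excludes only inputs where A raises
-- IndexError: a pseudoalignment with fewer than 2 entries reached with nonempty
-- indel_positions, or odd-length indel_positions together with a nonempty pseudoalignment list.
def Pre_search_for_simple_indels (pseudoalignments : List (List String)) (inter_indels : List String) (indel_positions : List Int) : Prop :=
  indel_positions = [] ∨
    ((∀ pa ∈ pseudoalignments, 2 ≤ pa.length) ∧
      (pseudoalignments = [] ∨ indel_positions.length % 2 = 0))
instance (pseudoalignments : List (List String)) (inter_indels : List String) (indel_positions : List Int) : Decidable (Pre_search_for_simple_indels pseudoalignments inter_indels indel_positions) := by unfold Pre_search_for_simple_indels; infer_instance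

def pvWitness_search_for_simple_indels : List (List String) × List String × List Int :=
  ([["x", "A--B"]], [], [(1 : Int), 3])

def Spec_search_for_simple_indels (pseudoalignments : List (List String)) (inter_indels : List String) (indel_positions : List Int) (out : String) : Prop := out = search_for_simple_indels_alt pseudoalignments inter_indels indel_positions
instance (pseudoalignments : List (List String)) (inter_indels : List String) (indel_positions : List Int) (out : String) : Decidable (Spec_search_for_simple_indels pseudoalignments inter_indels indel_positions out) := by unfold Spec_search_for_simple_indels; infer_instance

-- ===== CLAIM (what is proved, stated in full; the proofs are below) =====
def Claim_equal_search_for_simple_indels : Prop := ∀ (pseudoalignments : List (List String)) (inter_indels : List String) (indel_positions : List Int), Dom_search_for_simple_indels pseudoalignments inter_indels indel_positions → Pre_search_for_simple_indels pseudoalignments inter_indels indel_positions → Spec_search_for_simple_indels pseudoalignments inter_indels indel_positions (search_for_simple_indels pseudoalignments inter_indels indel_positions)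

-- ===== LEMMAS AND PROOFS =====

lemma pv_singleton_infix (c : Char) (l : List Char) : [c] <:+: l ↔ c ∈ l := by
  constructor
  · intro h
    exact List.singleton_sublist.mp h.sublist
  · intro h
    obtain ⟨s, t, rfl⟩ := List.append_of_mem h
    exact ⟨s, t, by simp⟩

lemma pv_clamp_eq (i : Int) (n : Nat) :
    pvClampB i (n : Int) = ((PySem.List.clampIdx n i : Nat) : Int) := by
  simp only [pvClampB, PySem.List.clampIdx]
  split_ifs <;> omega

lemma pv_fold_spec (cs : List Char) : ∀ (p : List Int) (c : Int),
    (cs.foldl pvStep (p, c)).1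
      = p ++ (List.range cs.length).map (fun k => c + ((cs.take (k + 1)).count '-' : Int)) := by
  induction cs with
  | nil => intro p c; simp
  | cons ch cs ih =>
    intro p c
    simp only [List.foldl_cons, pvStep]
    rw [ih]
    simp only [List.length_cons, List.range_succ_eq_map, List.map_cons, List.map_map]
    simp [List.count_cons, List.append_assoc, Function.comp]
    constructor
    · by_cases h : ch = '-' <;> simp [h]
    · intro k _
      by_cases h : ch = '-' <;> simp [h] <;> ring

lemma pv_table_spec (cs : List Char) :
    (pvDashTable cs).1 = (List.range (cs.length + 1)).map (fun k => ((cs.take k).count '-' : Int)) := by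
  simp only [pvDashTable, pv_fold_spec]
  simp [List.range_succ_eq_map, List.map_map, Function.comp]

lemma pv_table_get (cs : List Char) (k : Nat) (hk : k ≤ cs.length) :
    PySem.List.pyGetD (pvDashTable cs).1 (k : Int) 0 = ((cs.take k).count '-' : Int) := by
  rw [PySem.List.pyGetD_natCast, pv_table_spec]
  rw [List.getD_eq_getElem?_getD, List.getElem?_map, List.getElem?_range (by omega)]
  simp

lemma pv_core (cs : List Char) (a b : Int) :
    (¬ (List.replicate (PySem.List.slice cs (some a) (some b)).length '-' = PySem.List.slice cs (some a) (some b)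
        ∨ PySem.Chars.isIn ['-'] (PySem.List.slice cs (some a) (some b)) = false))
    ↔ (0 < PySem.List.pyGetD (pvDashTable cs).1 (pvClampB b (cs.length : Int)) 0
            - PySem.List.pyGetD (pvDashTable cs).1 (pvClampB a (cs.length : Int)) 0
        ∧ PySem.List.pyGetD (pvDashTable cs).1 (pvClampB b (cs.length : Int)) 0
            - PySem.List.pyGetD (pvDashTable cs).1 (pvClampB a (cs.length : Int)) 0
          < pvClampB b (cs.length : Int) - pvClampB a (cs.length : Int)) := by
  have haa : PySem.List.clampIdx cs.length a ≤ cs.length := PySem.List.clampIdx_le _ _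
  have hbb : PySem.List.clampIdx cs.length b ≤ cs.length := PySem.List.clampIdx_le _ _
  set aa := PySem.List.clampIdx cs.length a with haadef
  set bb := PySem.List.clampIdx cs.length b with hbbdef
  rw [pv_clamp_eq a, pv_clamp_eq b, pv_table_get _ _ haa, pv_table_get _ _ hbb]
  have hbody : PySem.List.slice cs (some a) (some b) = (cs.drop aa).take (bb - aa) := by
    simp [PySem.List.slice, haadef, hbbdef]
  rw [hbody]
  by_cases hord : bb ≤ aa
  · -- empty region: both sides are False
    have h0 : bb - aa = 0 := by omega
    rw [h0]
    have hcnt : (cs.take bb).count '-' ≤ (cs.take aa).count '-' := by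
      have : cs.take bb = List.take bb (cs.take aa) := by
        rw [List.take_take]; congr 1; omega
      rw [this]
      exact (List.take_sublist _ _).count_le _
    simp
    omega
  · -- aa < bb: the region is (cs.drop aa).take (bb - aa), d = its dash count
    have hlt : aa < bb := by omega
    have hsplit : cs.take bb = cs.take aa ++ (cs.drop aa).take (bb - aa) := by
      have hb2 : bb = aa + (bb - aa) := by omega
      conv_lhs => rw [hb2, List.take_add]
    have hcnt : (cs.take bb).count '-'
        = (cs.take aa).count '-' + ((cs.drop aa).take (bb - aa)).count '-' := by
      rw [hsplit, List.count_append]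
    have hlen : ((cs.drop aa).take (bb - aa)).length = bb - aa := by
      simp [List.length_take, List.length_drop]
      omega
    have hkle : ((cs.drop aa).take (bb - aa)).count '-' ≤ bb - aa := by
      have := List.count_le_length (a := '-') (l := (cs.drop aa).take (bb - aa))
      omega
    have h1 : (List.replicate ((cs.drop aa).take (bb - aa)).length '-' = (cs.drop aa).take (bb - aa))
        ↔ ((cs.drop aa).take (bb - aa)).count '-' = ((cs.drop aa).take (bb - aa)).length := by
      rw [eq_comm, List.eq_replicate_iff]
      constructor
      · rintro ⟨-, h⟩
        exact List.count_eq_length.mpr (fun x hx => (h x hx).symm)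
      · intro h
        exact ⟨rfl, fun x hx => (List.count_eq_length.mp h x hx).symm⟩
    have h2 : (PySem.Chars.isIn ['-'] ((cs.drop aa).take (bb - aa)) = false)
        ↔ ((cs.drop aa).take (bb - aa)).count '-' = 0 := by
      rw [← Bool.not_eq_true, PySem.Chars.isIn_iff_infix, pv_singleton_infix, List.count_eq_zero]
    rw [h1, h2, hlen, hcnt]
    push_cast
    omega

-- A's early-exit flag fold over a list equals 'all of the negated condition'
lemma pv_foldl_all {α : Type} (p : α → Prop) [DecidablePred p] (l : List α) :
    ∀ b : Bool, l.foldl (fun s x => if p x then false else s) b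
      = (b && l.all (fun x => !decide (p x))) := by
  induction l with
  | nil => intro b; simp
  | cons x xs ih =>
    intro b
    simp only [List.foldl_cons, List.all_cons]
    rw [ih]
    by_cases h : p x <;> simp [h, Bool.and_assoc]

lemma pv_all_congr {α : Type} (l : List α) (f g : α → Bool)
    (h : ∀ x ∈ l, f x = g x) : l.all f = l.all g := by
  induction l with
  | nil => rfl
  | cons x xs ih =>
    simp only [List.all_cons]
    rw [h x (by simp), ih (fun y hy => h y (by simp [hy]))]

-- the two per-alignment passes agree (A's scan of the slice vs B's prefix-count test)
lemma pv_inner_eq (pseudoalignments : List (List String)) (a b : Int) :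
    pseudoalignments.foldl (fun simple pseudoalignment =>
      let indel_body := PySem.List.slice (PySem.List.pyGetD pseudoalignment 1 "").toList (some a) (some b)
      if ¬ (List.replicate indel_body.length '-' = indel_body ∨ PySem.Chars.isIn ['-'] indel_body = false)
        then false else simple) true
    = (pseudoalignments.map (fun pa => pvDashTable (PySem.List.pyGetD pa 1 "").toList)).all
        (fun t => pvSimpleRegion t a b) := by
  rw [pv_foldl_all (fun pseudoalignment =>
      ¬ (List.replicate (PySem.List.slice (PySem.List.pyGetD pseudoalignment 1 "").toList (some a) (some b)).length '-'
            = PySem.List.slice (PySem.List.pyGetD pseudoalignment 1 "").toList (some a) (some b)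
          ∨ PySem.Chars.isIn ['-'] (PySem.List.slice (PySem.List.pyGetD pseudoalignment 1 "").toList (some a) (some b)) = false))]
  rw [Bool.true_and, List.all_map]
  apply pv_all_congr
  intro pa _
  simp only [Function.comp, pvSimpleRegion, pvDashTable]
  congr 1
  rw [decide_eq_decide]
  simpa [pvDashTable] using pv_core (PySem.List.pyGetD pa 1 "").toList a b

lemma pv_main (pseudoalignments : List (List String)) (inter_indels : List String) (indel_positions : List Int) :
    search_for_simple_indels pseudoalignments inter_indels indel_positions
      = search_for_simple_indels_alt pseudoalignments inter_indels indel_positions := by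
  simp only [search_for_simple_indels, search_for_simple_indels_alt]
  by_cases hnil : indel_positions = []
  · subst hnil
    simp [PySem.List.pyRange]
  · rw [if_neg hnil]
    refine congrArg String.ofList ?_
    congr 1
    funext acc i
    rw [pv_inner_eq]
    by_cases hb : (pseudoalignments.map (fun pa => pvDashTable (PySem.List.pyGetD pa 1 "").toList)).all
        (fun t => pvSimpleRegion t (PySem.List.pyGetD indel_positions i 0)
          (PySem.List.pyGetD indel_positions (i + 1) 0)) = true
    · rw [hb]; simp
    · rw [Bool.not_eq_true] at hb
      rw [hb]; simp

-- ===== VERDICT (by name: the statement is the Claim_ definition above) =====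
theorem search_for_simple_indels_spec : Claim_equal_search_for_simple_indels := by
  intro pseudoalignments inter_indels indel_positions _ _
  unfold Spec_search_for_simple_indels
  exact pv_main pseudoalignments inter_indels indel_positions
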